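-- pv_equiv track=rewrite | github.com/thantthet/keymagic-3 | scripts/update-version.py | update_cargo_toml
-- ===== SOURCE A (Python) =====
-- def update_cargo_toml(content, version):
--     """Update version in Cargo.toml files."""
--     lines = content.split('\n')
--     in_package_section = False
--     package_version_updated = False
--
--     for i, line in enumerate(lines):
--         # Check if we're entering the [package] section
--         if line.strip() == '[package]':
--             in_package_section = True
--         # Check if we're leaving the package section
--         elif line.strip().startswith('[') and line.strip() != '[package]':
--             in_package_section = False
--         # Update version in package section
--         elif in_package_section and not package_version_updated and line.strip().startswith('version'):
--             lines[i] = f'version = "{version}"'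
--             package_version_updated = True
--
--     return '\n'.join(lines)
-- ===== SOURCE B (Python) =====
-- def update_cargo_toml(content, version):
--     """Update version in Cargo.toml files."""
--     lines = content.split('\n')
--     strips = [l.strip() for l in lines]
--     for i, s in enumerate(strips):
--         if s.startswith('[') or not s.startswith('version'):
--             continue
--         # backward search for the governing section header of line i
--         for t in reversed(strips[:i]):
--             if t.startswith('['):
--                 if t == '[package]':
--                     return '\n'.join(lines[:i] + [f'version = "{version}"'] + lines[i+1:])
--                 break
--     return '\n'.join(lines)
-- ===== Notes on version B (the rewrite author's own statement) =====
-- stated objective: alternative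
-- what changed: Replaces A's stateful single pass (in_package/updated flags carried across lines, in-place edit during iteration) by a stateless nested-loop algorithm: scan candidate version lines and, for each, search backwards for its nearest preceding section header to decide whether it belongs to [package], then rebuild the result by slicing around the found index.
import Mathlib
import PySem

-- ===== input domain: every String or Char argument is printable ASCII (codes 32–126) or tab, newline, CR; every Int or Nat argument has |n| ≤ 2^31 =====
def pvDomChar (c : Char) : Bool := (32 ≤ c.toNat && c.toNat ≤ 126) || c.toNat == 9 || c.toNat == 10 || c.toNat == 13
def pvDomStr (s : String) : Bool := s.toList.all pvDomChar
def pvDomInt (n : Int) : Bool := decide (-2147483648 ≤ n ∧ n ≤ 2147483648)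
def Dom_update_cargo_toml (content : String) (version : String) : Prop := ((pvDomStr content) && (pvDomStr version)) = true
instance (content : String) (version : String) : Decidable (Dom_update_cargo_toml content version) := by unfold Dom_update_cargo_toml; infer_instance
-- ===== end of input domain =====

-- B replaces A's stateful single pass (section/updated flags) by a stateless candidate
-- scan with a backward search for each candidate's governing section header; equal output.

-- ===== PORT A =====
-- A's loop over enumerate(lines): mutating lines[i] only affects the already-yielded
-- position, so the loop is this structural recursion over the state
-- (in_package_section, package_version_updated).
def pvGoA (version : String) : List String → Bool → Bool → List String
  | [], _, _ => []
  | l :: ls, inp, upd =>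
    if PySem.Str.strip l == "[package]" then
      l :: pvGoA version ls true upd
    else if PySem.Str.startswith (PySem.Str.strip l) "[" && !(PySem.Str.strip l == "[package]") then
      l :: pvGoA version ls false upd
    else if inp && !upd && PySem.Str.startswith (PySem.Str.strip l) "version" then
      ("version = \"" ++ version ++ "\"") :: pvGoA version ls inp true
    else
      l :: pvGoA version ls inp upd

-- content.split('\n'): split? is always `some` for the nonempty separator "\n"
def update_cargo_toml (content : String) (version : String) : String :=
  PySem.Str.join "\n" (pvGoA version ((PySem.Str.split? content "\n").getD []) false false)

-- ===== PORT B =====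
-- inner loop `for t in reversed(strips[:i]): if t.startswith('['): …` — first header
-- going backwards; applied to (strips.take i).reverse.
def pvPrevHeader : List String → Option String
  | [] => none
  | t :: ts => if PySem.Str.startswith t "[" then some t else pvPrevHeader ts

-- outer loop `for i, s in enumerate(strips)`: skip headers and non-version lines;
-- otherwise decide by the nearest previous header (return index / break / keep going).
def pvScanB (strips : List String) : Nat → List String → Option Nat
  | _, [] => none
  | i, s :: rest =>
    if PySem.Str.startswith s "[" || !(PySem.Str.startswith s "version") then
      pvScanB strips (i + 1) rest
    else
      match pvPrevHeader ((strips.take i).reverse) with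
      | some h => if h == "[package]" then some i else pvScanB strips (i + 1) rest
      | none => pvScanB strips (i + 1) rest

-- lines[:i] + [new] + lines[i+1:] with 0 ≤ i < len(lines): exactly take/cons/drop
def update_cargo_toml_alt (content : String) (version : String) : String :=
  let lines := (PySem.Str.split? content "\n").getD []
  let strips := lines.map PySem.Str.strip
  match pvScanB strips 0 strips with
  | some i =>
      PySem.Str.join "\n"
        (lines.take i ++ [("version = \"" ++ version ++ "\"")] ++ lines.drop (i + 1))
  | none => PySem.Str.join "\n" lines

-- ===== PRECONDITION & SPEC =====
def Spec_update_cargo_toml (content : String) (version : String) (out : String) : Prop := out = update_cargo_toml_alt content version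
instance (content : String) (version : String) (out : String) : Decidable (Spec_update_cargo_toml content version out) := by unfold Spec_update_cargo_toml; infer_instance

-- ===== CLAIM (what is proved, stated in full; the proofs are below) =====
def Claim_equal_update_cargo_toml : Prop := ∀ (content : String) (version : String), Dom_update_cargo_toml content version → Spec_update_cargo_toml content version (update_cargo_toml content version)

-- ===== LEMMAS AND PROOFS =====

-- A reference search used only in the proofs: A's section-tracking state made explicit;
-- it returns the index A would rewrite, if any.
def pvFindTarget : List String → Option String → Nat → Option Nat
  | [], _, _ => none
  | l :: ls, section?, i =>
    if PySem.Str.startswith (PySem.Str.strip l) "[" then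
      pvFindTarget ls (some (PySem.Str.strip l)) (i + 1)
    else if section? == some "[package]" && PySem.Str.startswith (PySem.Str.strip l) "version" then
      some i
    else
      pvFindTarget ls section? (i + 1)

-- Once updated, A copies the rest of the lines unchanged.
theorem pvGoA_upd_true (version : String) : ∀ (ls : List String) (inp : Bool),
    pvGoA version ls inp true = ls := by
  intro ls
  induction ls with
  | nil => intro inp; rfl
  | cons l ls ih =>
    intro inp
    simp only [pvGoA, Bool.not_true, Bool.and_false, Bool.false_and, Bool.false_eq_true,
      if_false]
    split_ifs <;> rw [ih]

-- The index accumulator only shifts the result.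
theorem pvFindTarget_shift : ∀ (ls : List String) (sec : Option String) (i : Nat),
    pvFindTarget ls sec i = (pvFindTarget ls sec 0).map (· + i) := by
  intro ls
  induction ls with
  | nil => intro sec i; rfl
  | cons l ls ih =>
    intro sec i
    simp only [pvFindTarget]
    split_ifs with h1 h2
    · rw [ih _ (i + 1), ih _ 1, Option.map_map]
      congr 1; funext j; simp; omega
    · simp
    · rw [ih _ (i + 1), ih _ 1, Option.map_map]
      congr 1; funext j; simp; omega

-- A found index is in range.
theorem pvFindTarget_lt : ∀ (ls : List String) (sec : Option String) (n j : Nat),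
    pvFindTarget ls sec n = some j → j < n + ls.length := by
  intro ls
  induction ls with
  | nil => intro sec n j h; exact absurd h (by simp [pvFindTarget])
  | cons l ls ih =>
    intro sec n j h
    simp only [pvFindTarget] at h
    split_ifs at h with h1 h2
    · have := ih _ (n + 1) j h; simp at this ⊢; omega
    · simp at h; simp [← h]
    · have := ih _ (n + 1) j h; simp at this ⊢; omega

-- With A's in_package flag equal to "section tracker points at [package]", A's
-- not-yet-updated pass computes exactly "replace the line pvFindTarget finds, if any".
theorem pvGoA_eq_find (version : String) : ∀ (ls : List String) (sec : Option String),
    pvGoA version ls (sec == some "[package]") false =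
      (match pvFindTarget ls sec 0 with
       | some j => ls.set j ("version = \"" ++ version ++ "\"")
       | none => ls) := by
  intro ls
  induction ls with
  | nil => intro sec; rfl
  | cons l ls ih =>
    intro sec
    simp only [pvGoA, pvFindTarget]
    cases hpkg : PySem.Str.strip l == "[package]" with
    | true =>
      have hpkg' : PySem.Str.strip l = "[package]" := eq_of_beq hpkg
      have hbr : PySem.Str.startswith (PySem.Str.strip l) "[" = true := by
        rw [hpkg']; decide
      rw [if_pos (rfl : (true : Bool) = true), if_pos hbr, hpkg']
      rw [pvFindTarget_shift ls (some "[package]") 1]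
      have h := ih (some "[package]")
      rw [show ((some "[package]" : Option String) == some "[package]") = true from by
        decide] at h
      rw [h]
      cases pvFindTarget ls (some "[package]") 0 <;> simp
    | false =>
      rw [if_neg (by simp : ¬ ((false : Bool) = true))]
      simp only [Bool.not_false, Bool.and_true]
      cases hbr : PySem.Str.startswith (PySem.Str.strip l) "[" with
      | true =>
        rw [if_pos (rfl : (true : Bool) = true), if_pos (rfl : (true : Bool) = true)]
        rw [pvFindTarget_shift ls (some (PySem.Str.strip l)) 1]
        have h := ih (some (PySem.Str.strip l))
        rw [show ((some (PySem.Str.strip l) : Option String) == some "[package]") = false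
          from by simp_all] at h
        rw [h]
        cases pvFindTarget ls (some (PySem.Str.strip l)) 0 <;> simp
      | false =>
        rw [if_neg (by simp : ¬ ((false : Bool) = true)), if_neg (by simp : ¬ ((false : Bool) = true))]
        cases hv : ((sec == some "[package]") && PySem.Str.startswith (PySem.Str.strip l) "version") with
        | true =>
          rw [if_pos (rfl : (true : Bool) = true), if_pos (rfl : (true : Bool) = true)]
          rw [pvGoA_upd_true]
          simp
        | false =>
          rw [if_neg (by simp : ¬ ((false : Bool) = true)),
            if_neg (by simp : ¬ ((false : Bool) = true))]
          rw [pvFindTarget_shift ls sec 1, ih sec]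
          cases pvFindTarget ls sec 0 <;> simp

-- Main invariant: with A's section tracker equal to the nearest previous header of the
-- processed prefix, B's candidate scan (which recomputes that header backwards at each
-- candidate) equals pvFindTarget.
theorem pvScanB_eq_find : ∀ (ls : List String) (pre : List String),
    pvScanB (pre ++ ls.map PySem.Str.strip) pre.length (ls.map PySem.Str.strip)
      = pvFindTarget ls (pvPrevHeader pre.reverse) pre.length := by
  intro ls
  induction ls with
  | nil => intro pre; rfl
  | cons l ls ih =>
    intro pre
    have hS : pre ++ (PySem.Str.strip l :: ls.map PySem.Str.strip)
        = (pre ++ [PySem.Str.strip l]) ++ ls.map PySem.Str.strip := by simp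
    have ih' := ih (pre ++ [PySem.Str.strip l])
    simp only [List.length_append, List.length_cons, List.length_nil, Nat.zero_add,
      List.reverse_append, List.reverse_cons, List.reverse_nil, List.nil_append,
      List.cons_append] at ih'
    simp only [List.map_cons, pvScanB, pvFindTarget, List.take_left]
    rw [hS]
    cases hbr : PySem.Str.startswith (PySem.Str.strip l) "[" with
    | true =>
      simp only [Bool.true_or, if_true]
      rw [ih']
      simp only [pvPrevHeader, hbr, if_true]
    | false =>
      have hprev : pvPrevHeader (PySem.Str.strip l :: pre.reverse) = pvPrevHeader pre.reverse := by
        simp only [pvPrevHeader, hbr, Bool.false_eq_true, if_false]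
      rw [hprev] at ih'
      cases hv : PySem.Str.startswith (PySem.Str.strip l) "version" with
      | false =>
        simp only [Bool.false_or, Bool.not_false, if_true, Bool.and_false]
        rw [ih']
        simp
      | true =>
        simp only [Bool.false_or, Bool.not_true, Bool.and_true, if_false,
          Bool.false_eq_true]
        cases hsec : pvPrevHeader pre.reverse with
        | none =>
          rw [hsec] at ih'
          simp only [ih']
          rw [show ((none : Option String) == some "[package]") = false from rfl]
          simp
        | some h =>
          rw [hsec] at ih'
          cases hh : (h == "[package]") with
          | true =>
            simp only [hh, if_true]
            rw [show ((some h : Option String) == some "[package]") = true from by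
              simp [eq_of_beq hh]]
            simp
          | false =>
            simp only [hh, if_false, Bool.false_eq_true, ih']
            rw [show ((some h : Option String) == some "[package]") = false from by
              simpa using hh]
            simp

-- ===== VERDICT (by name: the statement is the Claim_ definition above) =====
theorem update_cargo_toml_spec : Claim_equal_update_cargo_toml := by
  intro content version _
  unfold Spec_update_cargo_toml update_cargo_toml update_cargo_toml_alt
  dsimp only
  have hA := pvGoA_eq_find version ((PySem.Str.split? content "\n").getD []) none
  rw [show ((none : Option String) == some "[package]") = false from rfl] at hA
  have hB := pvScanB_eq_find ((PySem.Str.split? content "\n").getD []) []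
  simp only [List.nil_append, List.length_nil, List.reverse_nil, pvPrevHeader] at hB
  rw [hA, hB]
  cases hf : pvFindTarget ((PySem.Str.split? content "\n").getD []) none 0 with
  | none => rfl
  | some j =>
    have hj : j < ((PySem.Str.split? content "\n").getD []).length := by
      have := pvFindTarget_lt ((PySem.Str.split? content "\n").getD []) none 0 j hf
      omega
    simp only []
    rw [List.set_eq_take_cons_drop _ hj]
    simp
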